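-- pv_equiv track=rewrite | github.com/joserlopes/FP_Project1 | Projeto1.py | eh_cifra
-- ===== SOURCE A (Python) =====
-- def eh_cifra(cifra):
--     '''
--     Esta função recebe uma cadeia de carateres e devolve True se essa cadeia é uma cifra
--     (uma ou mais palavras encriptadas separadas por traços)
--
--
--             Parametros:
--                 cifra(str): cadeia de caratéres
--
--             Retorna:
--                 True(bool) se o parametro corresponde a uma cifra (uma ou mais palavras encriptadas separadas por
--                 traços), Falso(bool) se não corresponde
--     '''
--
--     if type(cifra) != str or len(cifra) == 0 or cifra == "" or not cifra[0].isalpha():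
--         return False
--     for a in range(len(cifra.split("-"))):
--         for letter in cifra.split("-")[a]:
--             if letter == "" or not letter.isalpha() or not (96 < ord(letter) < 123):
--                 return False
--     return True
-- ===== SOURCE B (Python) =====
-- def eh_cifra(cifra):
--     # Single left-to-right scan: first char must be a lowercase ASCII letter,
--     # every later char a lowercase ASCII letter or a dash.
--     if type(cifra) != str or not cifra:
--         return False
--     return 'a' <= cifra[0] <= 'z' and all(c == '-' or 'a' <= c <= 'z' for c in cifra[1:])
-- ===== Notes on version B (the rewrite author's own statement) =====
-- stated objective: simpler
-- what changed: Replaces the split-on-dash plus index-driven nested scan (which re-splits the string on every outer iteration) by one direct character scan: first char lowercase letter, rest lowercase letters or dashes.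
import Mathlib
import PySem

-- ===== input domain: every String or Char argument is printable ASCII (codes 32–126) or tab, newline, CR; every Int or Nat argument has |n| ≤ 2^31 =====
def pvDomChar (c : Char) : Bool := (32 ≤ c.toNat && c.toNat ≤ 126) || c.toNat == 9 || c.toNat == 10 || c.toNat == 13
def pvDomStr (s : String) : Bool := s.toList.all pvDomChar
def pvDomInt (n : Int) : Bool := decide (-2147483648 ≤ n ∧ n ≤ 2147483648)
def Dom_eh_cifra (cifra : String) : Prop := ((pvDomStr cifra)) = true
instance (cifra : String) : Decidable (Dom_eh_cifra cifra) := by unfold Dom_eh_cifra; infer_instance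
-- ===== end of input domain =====

-- B replaces A's split-on-dash nested index loop by one direct character scan (simpler, one pass).

-- ===== PORT A =====
-- 'type(cifra) != str' is always false for a String argument; 'letter == ""' is always
-- false for a single character, ported as the literal 'false' disjunct.
def eh_cifra (cifra : String) : Bool :=
  if PySem.Str.len cifra == 0 || cifra == "" ||
      !(PySem.Chars.isalpha (PySem.List.pyGetD cifra.toList 0 ' ')) then
    false
  else
    (PySem.List.pyRange 0 ((PySem.Chars.splitOn cifra.toList ['-']).length : Int) 1).all
      (fun a =>
        (PySem.List.pyGetD (PySem.Chars.splitOn cifra.toList ['-']) a []).all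
          (fun letter =>
            !(false || !PySem.Chars.isalpha letter ||
              !(96 < letter.toNat && letter.toNat < 123))))

-- ===== PORT B =====
def eh_cifra_alt (cifra : String) : Bool :=
  match cifra.toList with
  | [] => false
  | c :: rest =>
      (decide ('a' ≤ c) && decide (c ≤ 'z')) &&
        rest.all (fun d => d == '-' || (decide ('a' ≤ d) && decide (d ≤ 'z')))

-- ===== PRECONDITION & SPEC =====
def Spec_eh_cifra (cifra : String) (out : Bool) : Prop := out = eh_cifra_alt cifra
instance (cifra : String) (out : Bool) : Decidable (Spec_eh_cifra cifra out) := by unfold Spec_eh_cifra; infer_instance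

-- ===== CLAIM (what is proved, stated in full; the proofs are below) =====
def Claim_equal_eh_cifra : Prop := ∀ (cifra : String), Dom_eh_cifra cifra → Spec_eh_cifra cifra (eh_cifra cifra)

-- ===== LEMMAS AND PROOFS =====

lemma pvChar_le_iff (a b : Char) : a ≤ b ↔ a.toNat ≤ b.toNat := by
  rw [Char.le_def, UInt32.le_iff_toNat_le]; rfl

-- A's inner letter test equals "lowercase ASCII letter"
lemma pvQ_eq (d : Char) :
    (!(false || !PySem.Chars.isalpha d || !(96 < d.toNat && d.toNat < 123)))
      = (decide ('a' ≤ d) && decide (d ≤ 'z')) := by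
  simp only [PySem.Chars.isalpha, PySem.Chars.isupper, PySem.Chars.islower]
  by_cases h1 : 'a' ≤ d <;> by_cases h2 : d ≤ 'z' <;>
    simp_all [pvChar_le_iff, show 'a'.toNat = 97 from rfl, show 'z'.toNat = 122 from rfl,
      show 'A'.toNat = 65 from rfl, show 'Z'.toNat = 90 from rfl] <;>
    first
      | omega
      | (rw [Bool.eq_iff_iff]; simp only [Bool.and_eq_true, Bool.or_eq_true, decide_eq_true_eq]; omega)

-- splitOn.go with separator "-": every letter of every produced part satisfies P
-- iff every character of the remaining input is '-' or satisfies P (given the state)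
lemma pvGo_all (P : Char → Bool) :
    ∀ (fuel : Nat) (l cur : List Char) (acc : List (List Char)), l.length < fuel →
      ((PySem.Chars.splitOn.go ['-'] fuel l cur acc).all (fun part => part.all P))
        = (acc.all (fun part => part.all P) && cur.all P &&
            l.all (fun d => d == '-' || P d)) := by
  intro fuel
  induction fuel with
  | zero => intro l cur acc h; omega
  | succ n ih =>
    intro l cur acc h
    cases l with
    | nil =>
      simp only [PySem.Chars.splitOn.go, List.all_reverse, List.all_cons, List.all_nil]
      cases hcur : cur.all P <;> cases hacc : acc.all (fun part => part.all P) <;> simp [hcur, hacc]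
    | cons c rest =>
      have hlen : rest.length < n := by simp at h; omega
      simp only [PySem.Chars.splitOn.go, Bool.and_true]
      by_cases hc : c = '-'
      · subst hc
        rw [if_pos (by simp)]
        simp only [List.length_singleton, List.drop_one, List.tail_cons]
        rw [ih rest [] (cur.reverse :: acc) hlen]
        simp only [List.all_cons, List.all_nil, List.all_reverse, beq_self_eq_true,
          Bool.true_or, Bool.true_and]
        cases hcur : cur.all P <;> cases hacc : acc.all (fun part => part.all P) <;>
          simp [hcur, hacc]
      · rw [if_neg (by simp [List.isPrefixOf]; exact fun hcontra => hc hcontra.symm)]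
        rw [ih rest (c :: cur) acc hlen]
        have hbeq' : (c == '-') = false := by simpa using hc
        simp only [List.all_cons, hbeq', Bool.false_or]
        cases hP : P c <;> cases hcur : cur.all P <;>
          cases hacc : acc.all (fun part => part.all P) <;> simp [hP, hcur, hacc]

lemma pvSplit_all (s : List Char) (P : Char → Bool) :
    ((PySem.Chars.splitOn s ['-']).all (fun part => part.all P))
      = s.all (fun d => d == '-' || P d) := by
  unfold PySem.Chars.splitOn
  rw [pvGo_all P (s.length + 1) s [] [] (by omega)]
  simp

-- ===== VERDICT (by name: the statement is the Claim_ definition above) =====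
theorem eh_cifra_spec : Claim_equal_eh_cifra := by
  intro cifra _
  unfold Spec_eh_cifra eh_cifra eh_cifra_alt
  cases hs : cifra.toList with
  | nil =>
    have h0 : PySem.Str.len cifra = 0 := by simp [PySem.Str.len, hs]
    rw [h0]
    simp
  | cons c rest =>
    have hne : (cifra == "") = false := by
      simp only [beq_eq_false_iff_ne, ne_eq]
      intro h; rw [← String.toList_inj] at h; simp [hs] at h
    have hlen : (PySem.Str.len cifra == 0) = false := by
      simp only [PySem.Str.len, hs, List.length_cons]
      simp only [beq_eq_false_iff_ne, ne_eq]
      omega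
    rw [hlen, hne]
    have hget : PySem.List.pyGetD (c :: rest) 0 ' ' = c := by
      simp [PySem.List.pyGetD, PySem.List.pyGet?, PySem.List.pyIdx?]
    rw [hget]
    have hloop :
        ((PySem.List.pyRange 0 ((PySem.Chars.splitOn (c :: rest) ['-']).length : Int) 1).all
            (fun a => (PySem.List.pyGetD (PySem.Chars.splitOn (c :: rest) ['-']) a []).all
              (fun letter => !(false || !PySem.Chars.isalpha letter ||
                !(96 < letter.toNat && letter.toNat < 123)))))
          = (PySem.Chars.splitOn (c :: rest) ['-']).all (fun part => part.all
              (fun letter => !(false || !PySem.Chars.isalpha letter ||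
                !(96 < letter.toNat && letter.toNat < 123)))) := by
      conv_rhs => rw [← PySem.List.map_pyGetD_pyRange_zero' (PySem.Chars.splitOn (c :: rest) ['-']) ([] : List Char), List.all_map]
      rfl
    by_cases halpha : PySem.Chars.isalpha c = true
    · rw [if_neg (by simp [halpha])]
      rw [hloop, pvSplit_all]
      simp only [List.all_cons, pvQ_eq]
      by_cases hlow : ('a' ≤ c ∧ c ≤ 'z')
      · simp [hlow.1, hlow.2]
      · have hor : ('A' ≤ c ∧ c ≤ 'Z') ∨ ('a' ≤ c ∧ c ≤ 'z') := by
          simpa [PySem.Chars.isalpha, PySem.Chars.isupper, PySem.Chars.islower,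
            Bool.or_eq_true, Bool.and_eq_true, decide_eq_true_eq] using halpha
        have hcu : ('A' ≤ c ∧ c ≤ 'Z') := hor.resolve_right hlow
        have hnd : (c == '-') = false := by
          simp only [beq_eq_false_iff_ne, ne_eq]
          intro h; subst h
          rcases hcu with ⟨h1, h2⟩
          rw [pvChar_le_iff] at h1
          simp [show ('A').toNat = 65 from rfl, show ('-').toNat = 45 from rfl] at h1
        have hlb : (decide ('a' ≤ c) && decide (c ≤ 'z')) = false := by
          by_cases h1 : 'a' ≤ c <;> by_cases h2 : c ≤ 'z' <;> simp_all
        simp [hnd, hlb]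
    · have halpha' : PySem.Chars.isalpha c = false := by
        cases h : PySem.Chars.isalpha c
        · rfl
        · exact absurd h halpha
      rw [if_pos (by simp [halpha'])]
      have hlb : (decide ('a' ≤ c) && decide (c ≤ 'z')) = false := by
        by_cases h1 : 'a' ≤ c <;> by_cases h2 : c ≤ 'z' <;>
          simp_all [PySem.Chars.isalpha, PySem.Chars.isupper, PySem.Chars.islower]
      simp [hlb]
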